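-- pv_equiv track=rewrite | github.com/AlexandreCotorobai/FP | APA1/MiniTeste/Exercício3(dif de pos entre 1 e ultimo).py | positionDifferenceFirstLastLargest
-- ===== SOURCE A (Python) =====
-- def positionDifferenceFirstLastLargest(lst):
--     max = lst[0]
--     for n in lst:
--         if n > max :
--             max = n
--
--     maxes = []
--     for i in range(len(lst)):
--         if lst[i] == max:
--             maxes.append(i)
--     return maxes[0] - maxes[-1]
-- ===== SOURCE B (Python) =====
-- def positionDifferenceFirstLastLargest(lst):
--     m = lst[0]
--     first = 0
--     last = 0
--     for i, n in enumerate(lst):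
--         if n > m:
--             m = n
--             first = i
--             last = i
--         elif n == m:
--             last = i
--     return first - last
-- ===== Notes on version B (the rewrite author's own statement) =====
-- stated objective: simpler
-- what changed: Replaces A's three passes (find max, collect all max indices into a list, subtract first and last) by one enumerate pass maintaining (current max, its first index, its last index) in O(1) extra space.
import Mathlib
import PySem

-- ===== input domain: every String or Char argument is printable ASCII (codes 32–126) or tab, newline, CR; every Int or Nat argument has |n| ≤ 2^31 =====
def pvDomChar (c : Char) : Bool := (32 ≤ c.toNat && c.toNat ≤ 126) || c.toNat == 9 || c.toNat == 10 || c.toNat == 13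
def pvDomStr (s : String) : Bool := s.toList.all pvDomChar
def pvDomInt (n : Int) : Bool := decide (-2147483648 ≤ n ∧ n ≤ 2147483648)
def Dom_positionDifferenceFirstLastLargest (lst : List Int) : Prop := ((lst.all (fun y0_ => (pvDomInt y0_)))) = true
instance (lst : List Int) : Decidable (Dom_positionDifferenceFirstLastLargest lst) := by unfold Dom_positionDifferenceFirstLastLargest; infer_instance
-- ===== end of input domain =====

-- B fuses A's three passes (find max; collect max indices; subtract first and last) into one pass keeping (max, first idx, last idx).


-- ===== PORT A =====
def positionDifferenceFirstLastLargest (lst : List Int) : Int :=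
  match lst with
  | [] => 0  -- Python raises IndexError at lst[0]; excluded by Pre_
  | x :: _ =>
    let m := lst.foldl (fun mx n => if n > mx then n else mx) x
    let maxes : List Int := (PySem.List.pyRange 0 lst.length 1).foldl
        (fun acc i => if PySem.List.pyGetD lst i 0 = m then acc ++ [i] else acc) []
    -- maxes[0] - maxes[-1]; maxes is nonempty whenever lst is, so the defaults are unreachable
    ((PySem.List.pyGet? maxes 0).getD 0) - ((PySem.List.pyGet? maxes (-1)).getD 0)

-- ===== PORT B =====
def positionDifferenceFirstLastLargest_alt (lst : List Int) : Int :=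
  match lst with
  | [] => 0  -- Python raises IndexError at lst[0]; excluded by Pre_
  | x :: _ =>
    let s := (PySem.List.enumerate lst 0).foldl
      (fun (st : Int × Int × Int) (p : Int × Int) =>
        if p.2 > st.1 then (p.2, p.1, p.1)
        else if p.2 = st.1 then (st.1, st.2.1, p.1)
        else st) (x, 0, 0)
    s.2.1 - s.2.2

-- ===== PRECONDITION & SPEC =====
-- Pre_ excludes only the empty list, on which Python A raises IndexError.
def Pre_positionDifferenceFirstLastLargest (lst : List Int) : Prop := lst ≠ []
instance (lst : List Int) : Decidable (Pre_positionDifferenceFirstLastLargest lst) := by unfold Pre_positionDifferenceFirstLastLargest; infer_instance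
def pvWitness_positionDifferenceFirstLastLargest : List Int := [3, 1, 3]

def Spec_positionDifferenceFirstLastLargest (lst : List Int) (out : Int) : Prop := out = positionDifferenceFirstLastLargest_alt lst
instance (lst : List Int) (out : Int) : Decidable (Spec_positionDifferenceFirstLastLargest lst out) := by unfold Spec_positionDifferenceFirstLastLargest; infer_instance

-- ===== CLAIM (what is proved, stated in full; the proofs are below) =====
def Claim_equal_positionDifferenceFirstLastLargest : Prop := ∀ (lst : List Int), Dom_positionDifferenceFirstLastLargest lst → Pre_positionDifferenceFirstLastLargest lst → Spec_positionDifferenceFirstLastLargest lst (positionDifferenceFirstLastLargest lst)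

-- ===== LEMMAS AND PROOFS =====

-- A's max-accumulation function and B's loop body, named for the proofs.
def pvFmax (mx n : Int) : Int := if n > mx then n else mx

def pvBStep (st : Int × Int × Int) (p : Int × Int) : Int × Int × Int :=
  if p.2 > st.1 then (p.2, p.1, p.1)
  else if p.2 = st.1 then (st.1, st.2.1, p.1)
  else st

lemma pvFmax_le (l : List Int) (b : Int) : b ≤ l.foldl pvFmax b := by
  induction l generalizing b with
  | nil => simp
  | cons y ys ih =>
    simp only [List.foldl_cons]
    refine le_trans ?_ (ih (pvFmax b y))
    unfold pvFmax; split <;> omega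

lemma pvMem_le_foldl (l : List Int) (b y : Int) (hy : y ∈ l) : y ≤ l.foldl pvFmax b := by
  induction l generalizing b with
  | nil => simp at hy
  | cons z zs ih =>
    simp only [List.foldl_cons]
    rcases List.mem_cons.mp hy with h | h
    · subst h
      refine le_trans ?_ (pvFmax_le zs (pvFmax b y))
      unfold pvFmax; split <;> omega
    · exact ih (pvFmax b z) h

-- A's index-collecting loop equals filtering the enumeration and keeping the indices.
lemma pvMaxes_eq (lst : List Int) (m : Int) :
    (PySem.List.pyRange 0 lst.length 1).foldl
        (fun acc i => if PySem.List.pyGetD lst i 0 = m then acc ++ [i] else acc) []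
      = ((PySem.List.enumerate lst 0).filter (fun p => decide (p.2 = m))).map (fun p => p.1) := by
  rw [PySem.List.foldl_append_ite_eq_filter, List.nil_append,
      PySem.List.enumerate_eq_map_pyRange lst 0, List.filter_map, List.map_map]
  simp [Function.comp_def]

lemma pvGetLastD_concat (l : List Int) (b : Int) : (l ++ [b]).getLastD 0 = b := by
  rw [List.getLastD_eq_getLast?, List.getLast?_concat]; rfl

-- Main invariant, by reverse induction on the tail: B's fold returns A's max together with
-- the head and last of A's max-index list, which is nonempty.
lemma pvKey (x : Int) (ys : List Int) :
    ((PySem.List.enumerate (x :: ys) 0).foldl pvBStep (x, 0, 0)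
        = ((x :: ys).foldl pvFmax x,
           (((PySem.List.enumerate (x :: ys) 0).filter (fun p => decide (p.2 = (x :: ys).foldl pvFmax x))).map (fun p => p.1)).headD 0,
           (((PySem.List.enumerate (x :: ys) 0).filter (fun p => decide (p.2 = (x :: ys).foldl pvFmax x))).map (fun p => p.1)).getLastD 0))
    ∧ ((PySem.List.enumerate (x :: ys) 0).filter (fun p => decide (p.2 = (x :: ys).foldl pvFmax x))).map (fun p => p.1) ≠ [] := by
  induction ys using List.reverseRecOn with
  | nil =>
    constructor
    · simp [PySem.List.enumerate, pvBStep, pvFmax]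
    · simp [PySem.List.enumerate, pvFmax]
  | append_singleton zs a ih =>
    rw [show x :: (zs ++ [a]) = (x :: zs) ++ [a] by simp]
    obtain ⟨ih1, ih2⟩ := ih
    set lst' := x :: zs with hlst'
    set m' := lst'.foldl pvFmax x with hm'
    set E' := PySem.List.enumerate lst' 0 with hE'
    have hEapp : PySem.List.enumerate (lst' ++ [a]) 0
        = E' ++ [((lst'.length : Int), a)] := by
      rw [PySem.List.enumerate_append]
      simp [PySem.List.enumerate]
      exact hE'.symm
    have hmapp : (lst' ++ [a]).foldl pvFmax x = pvFmax m' a := by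
      rw [List.foldl_append, ← hm']; rfl
    have hsnd : ∀ p ∈ E', p.2 ≤ m' := by
      intro p hp
      have : p.2 ∈ lst' := by
        have := List.mem_map_of_mem (f := fun p : Int × Int => p.2) hp
        rwa [hE', PySem.List.map_snd_enumerate] at this
      exact pvMem_le_foldl lst' x p.2 this
    rw [hEapp, hmapp, List.foldl_append, ih1]
    by_cases hgt : a > m'
    · have hm : pvFmax m' a = a := by unfold pvFmax; simp [hgt]
      have hfilt : E'.filter (fun p => decide (p.2 = a)) = [] := by
        apply List.filter_eq_nil_iff.mpr
        intro p hp
        have := hsnd p hp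
        simp only [decide_eq_true_eq]
        omega
      rw [hm]
      constructor
      · rw [List.filter_append, hfilt]
        simp [List.foldl, pvBStep, hgt]
      · rw [List.filter_append, hfilt]
        simp
    · have hm : pvFmax m' a = m' := by unfold pvFmax; simp; omega
      rw [hm]
      by_cases heq : a = m'
      · have hfa : (List.filter (fun p => decide (p.2 = m')) [((lst'.length : Int), a)]) = [((lst'.length : Int), a)] := by
          simp [heq]
        constructor
        · rw [List.filter_append, hfa, List.map_append]
          simp only [List.foldl, pvBStep]
          obtain ⟨c, cs, hc⟩ := List.exists_cons_of_ne_nil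
            (ih2 : (E'.filter (fun p => decide (p.2 = m'))).map (fun p => p.1) ≠ [])
          simp only [hc]
          have h3 := pvGetLastD_concat (c :: cs) ((lst'.length : Int))
          rw [List.cons_append, List.getLastD_eq_getLast?] at h3
          simp [heq, h3]
        · rw [List.filter_append, hfa, List.map_append]
          simp
      · have hfa : (List.filter (fun p => decide (p.2 = m')) [((lst'.length : Int), a)]) = [] := by
          simp [heq]
        constructor
        · rw [List.filter_append, hfa, List.append_nil]
          simp [List.foldl, pvBStep, hgt, heq]
        · rw [List.filter_append, hfa, List.append_nil]
          exact ih2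

-- ===== VERDICT (by name: the statement is the Claim_ definition above) =====
theorem positionDifferenceFirstLastLargest_spec : Claim_equal_positionDifferenceFirstLastLargest := by
  intro lst _ hpre
  unfold Spec_positionDifferenceFirstLastLargest
  match lst with
  | [] => exact absurd rfl hpre
  | x :: ys =>
    unfold positionDifferenceFirstLastLargest positionDifferenceFirstLastLargest_alt
    simp only
    have hfm : (fun mx n : Int => if n > mx then n else mx) = pvFmax := by
      funext mx n; rfl
    have hbs : (fun (st : Int × Int × Int) (p : Int × Int) =>
        if p.2 > st.1 then (p.2, p.1, p.1)
        else if p.2 = st.1 then (st.1, st.2.1, p.1) else st) = pvBStep := by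
      funext st p; rfl
    rw [hfm, hbs, pvMaxes_eq]
    obtain ⟨h1, h2⟩ := pvKey x ys
    rw [h1]
    set mx := ((PySem.List.enumerate (x :: ys) 0).filter
        (fun p => decide (p.2 = (x :: ys).foldl pvFmax x))).map (fun p => p.1) with hmx
    obtain ⟨c, cs, hc⟩ := List.exists_cons_of_ne_nil h2
    rw [hc]
    simp [PySem.List.pyGet?_neg_one, List.getLastD_eq_getLast?]
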